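-- pv_equiv track=rewrite | github.com/kushal5306/hiringstudy01 | kushal_solution/task_3.py | analyze_watermarks
-- ===== SOURCE A (Python) =====
-- from typing import Dict, List
--
-- def analyze_watermarks(features_list: List[dict], num_pages: int) -> Dict[str, List[int]]:
--     """
--     Analyze a list of features dictionaries to determine document partitions based on watermarks.
--
--     Args:
--         features_list (List[dict]): A list of dictionaries containing extracted features.
--         num_pages (int): The total number of pages in the PDF document.
--
--     Returns:
--         Dict[str, List[int]]: A dictionary mapping document names to page numbers.
--     """
--     document_groups = {}
--     current_document = "Document 1"
--     document_groups[current_document] = []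
--     previous_watermark = None
--     for i, features in enumerate(features_list):
--         watermark_text = features.get('watermark', "")
--         if previous_watermark is not None and watermark_text != previous_watermark:
--             current_document = f"Document {len(document_groups) + 1}"
--             document_groups[current_document] = []
--         document_groups[current_document].append(i + 1)
--         previous_watermark = watermark_text
--     return document_groups
-- ===== SOURCE B (Python) =====
-- def analyze_watermarks(features_list, num_pages):
--     ws = [f.get('watermark', "") for f in features_list]
--     bounds = [0] + [i for i, (a, b) in enumerate(zip(ws, ws[1:]), 1) if a != b] + [len(ws)]
--     return {f"Document {k}": list(range(lo + 1, hi + 1))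
--             for k, (lo, hi) in enumerate(zip(bounds, bounds[1:]), 1)}
-- ===== Notes on version B (the rewrite author's own statement) =====
-- stated objective: alternative
-- what changed: B first computes the list of break indices where adjacent watermarks differ, then builds each document directly as the arithmetic range between consecutive boundary indices, instead of A's stateful scan that appends page numbers one by one into a dict keyed by its own current length.
import Mathlib
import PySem

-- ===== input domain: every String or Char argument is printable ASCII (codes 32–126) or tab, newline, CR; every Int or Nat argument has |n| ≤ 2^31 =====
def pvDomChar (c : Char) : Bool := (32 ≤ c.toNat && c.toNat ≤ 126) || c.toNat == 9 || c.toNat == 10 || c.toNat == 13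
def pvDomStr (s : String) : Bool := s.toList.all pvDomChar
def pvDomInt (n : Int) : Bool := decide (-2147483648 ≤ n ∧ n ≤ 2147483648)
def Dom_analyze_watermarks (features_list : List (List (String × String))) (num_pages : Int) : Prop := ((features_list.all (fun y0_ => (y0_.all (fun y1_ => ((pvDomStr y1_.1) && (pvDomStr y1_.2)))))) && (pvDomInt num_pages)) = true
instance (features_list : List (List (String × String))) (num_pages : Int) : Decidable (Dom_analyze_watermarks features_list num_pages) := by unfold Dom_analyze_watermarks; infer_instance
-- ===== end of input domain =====

-- B replaces A's stateful dict-building scan by a staged computation: first the break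
-- indices where adjacent watermarks differ, then each document as the arithmetic range
-- between consecutive boundaries; same results (objective: alternative).

-- ===== PORT A =====
-- the for-loop of A as structural recursion over features_list, carrying (i, document_groups, current_document, previous_watermark)
def analyzeLoop : List (List (String × String)) → Int → PySem.Dict String (List Int) → String → Option String → PySem.Dict String (List Int)
  | [], _, document_groups, _, _ => document_groups
  | features :: rest, i, document_groups, current_document, previous_watermark =>
      let watermark_text := (PySem.Dict.ofList features).getD "watermark" ""
      let st :=
        match previous_watermark with
        | some p =>
            if watermark_text ≠ p then
              let nd := "Document " ++ PySem.Int.toStr ((document_groups.size : Int) + 1)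
              (document_groups.insert nd ([] : List Int), nd)
            else (document_groups, current_document)
        | none => (document_groups, current_document)
      analyzeLoop rest (i + 1) (st.1.modify st.2 [] (fun l => l ++ [i + 1])) st.2 (some watermark_text)

def analyze_watermarks (features_list : List (List (String × String))) (num_pages : Int) : List (String × List Int) :=
  (analyzeLoop features_list 0 ((PySem.Dict.empty : PySem.Dict String (List Int)).insert "Document 1" ([] : List Int)) "Document 1" none).items

-- ===== PORT B =====
-- the break-index comprehension [i for i, (a, b) in enumerate(zip(ws, ws[1:]), 1) if a != b]
def brkAux : List (String × String) → Int → List Int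
  | [], _ => []
  | (a, b) :: t, i => if a ≠ b then i :: brkAux t (i + 1) else brkAux t (i + 1)

-- the dict comprehension {f"Document {k}": list(range(lo+1, hi+1)) for k, (lo, hi) in enumerate(zip(bounds, bounds[1:]), 1)}
def altComp : List (Int × Int) → Int → PySem.Dict String (List Int) → PySem.Dict String (List Int)
  | [], _, d => d
  | (lo, hi) :: t, k, d =>
      altComp t (k + 1) (d.insert ("Document " ++ PySem.Int.toStr k) (PySem.List.pyRange (lo + 1) (hi + 1) 1))

def analyze_watermarks_alt (features_list : List (List (String × String))) (num_pages : Int) : List (String × List Int) :=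
  let ws := features_list.map (fun f => (PySem.Dict.ofList f).getD "watermark" "")
  let bounds := [(0 : Int)] ++ brkAux (ws.zip (PySem.List.slice ws (some 1) none)) 1 ++ [(ws.length : Int)]
  (altComp (bounds.zip (PySem.List.slice bounds (some 1) none)) 1 (PySem.Dict.empty : PySem.Dict String (List Int))).items

-- ===== PRECONDITION & SPEC =====
def Spec_analyze_watermarks (features_list : List (List (String × String))) (num_pages : Int) (out : List (String × List Int)) : Prop := out = analyze_watermarks_alt features_list num_pages
instance (features_list : List (List (String × String))) (num_pages : Int) (out : List (String × List Int)) : Decidable (Spec_analyze_watermarks features_list num_pages out) := by unfold Spec_analyze_watermarks; infer_instance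

-- ===== CLAIM (what is proved, stated in full; the proofs are below) =====
def Claim_equal_analyze_watermarks : Prop := ∀ (features_list : List (List (String × String))) (num_pages : Int), Dom_analyze_watermarks features_list num_pages → Spec_analyze_watermarks features_list num_pages (analyze_watermarks features_list num_pages)

-- ===== LEMMAS AND PROOFS =====

-- proof-side vocabulary
def docName (m : Nat) : String := "Document " ++ PySem.Int.toStr (m : Int)
def pvNames (m : Nat) : List String := (List.range m).map (fun j => docName (j + 1))
def pagesOf : List String → Int → List Int
  | [], _ => []
  | _ :: g, page => (page + 1) :: pagesOf g (page + 1)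
def chunkRuns : List String → List (List String)
  | [] => []
  | w :: ws => (w :: ws.takeWhile (fun x => x == w)) :: chunkRuns (ws.dropWhile (fun x => x == w))
termination_by ws => ws.length
decreasing_by simpa using Nat.lt_succ_of_le (List.length_dropWhile_le _ ws)
def specRuns : List (List String) → Nat → Int → List (String × List Int)
  | [], _, _ => []
  | g :: rs, k, page => (docName k, pagesOf g page) :: specRuns rs (k + 1) (page + g.length)
def specA : List String → Int → List (String × List Int) → List Int → Nat → String → List (String × List Int)
  | [], _, done, cur, m, _ => done ++ [(docName m, cur)]
  | w :: ws, page, done, cur, m, w0 =>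
      if w = w0 then specA ws (page + 1) done (cur ++ [page + 1]) m w0
      else specA ws (page + 1) (done ++ [(docName m, cur)]) ([page + 1]) (m + 1) w
def specPairs : List (Int × Int) → Nat → List (String × List Int)
  | [], _ => []
  | (lo, hi) :: t, k => (docName k, PySem.List.pyRange (lo + 1) (hi + 1) 1) :: specPairs t (k + 1)
def canon : List String → List (String × List Int)
  | [] => [(docName 1, [])]
  | w :: ws => specRuns (chunkRuns (w :: ws)) 1 0

-- injectivity of the generated document names
lemma pv_digitChar_inj {a b : Nat} (ha : a < 10) (hb : b < 10) (h : Nat.digitChar a = Nat.digitChar b) : a = b := by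
  interval_cases a <;> interval_cases b <;> simp_all [Nat.digitChar]

lemma pv_map_digitChar_inj : ∀ (l1 l2 : List Nat), (∀ x ∈ l1, x < 10) → (∀ x ∈ l2, x < 10) →
    l1.map Nat.digitChar = l2.map Nat.digitChar → l1 = l2
  | [], [], _, _, _ => rfl
  | a :: l1, b :: l2, h1, h2, h => by
      simp only [List.map_cons, List.cons.injEq] at h
      have := pv_digitChar_inj (h1 a (by simp)) (h2 b (by simp)) h.1
      have := pv_map_digitChar_inj l1 l2 (fun x hx => h1 x (by simp [hx])) (fun x hx => h2 x (by simp [hx])) h.2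
      simp_all

lemma pv_toDigitsCore_eq : ∀ (fuel n : Nat) (ds : List Char), n < fuel → 0 < n →
    Nat.toDigitsCore 10 fuel n ds = ((Nat.digits 10 n).map Nat.digitChar).reverse ++ ds := by
  intro fuel
  induction fuel with
  | zero => intro n ds h; omega
  | succ f ih =>
      intro n ds h hn
      rw [Nat.toDigitsCore]
      by_cases h10 : n / 10 = 0
      · have hlt : n < 10 := by omega
        have : Nat.digits 10 n = [n] := by
          rw [Nat.digits_def' (by norm_num) hn, Nat.mod_eq_of_lt hlt, h10]
          simp
        simp [h10, this, Nat.mod_eq_of_lt hlt]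
      · have h1 : 0 < n / 10 := Nat.pos_of_ne_zero h10
        have h2 : n / 10 < f := by
          have := Nat.div_lt_self hn (by norm_num : 1 < 10)
          omega
        simp only [h10, if_false]
        rw [ih (n / 10) _ h2 h1, Nat.digits_def' (by norm_num : 1 < 10) hn]
        simp

lemma pv_toDigits_inj {m n : Nat} (hm : 0 < m) (hn : 0 < n)
    (h : Nat.toDigits 10 m = Nat.toDigits 10 n) : m = n := by
  unfold Nat.toDigits at h
  rw [pv_toDigitsCore_eq (m + 1) m [] (by omega) hm,
      pv_toDigitsCore_eq (n + 1) n [] (by omega) hn] at h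
  simp only [List.append_nil] at h
  have h2 := List.reverse_injective h
  have h3 := pv_map_digitChar_inj _ _ (fun x hx => Nat.digits_lt_base (by norm_num) hx)
    (fun x hx => Nat.digits_lt_base (by norm_num) hx) h2
  exact Nat.digits_inj_iff.mp h3

lemma pv_docName_inj {m n : Nat} (hm : 0 < m) (hn : 0 < n) (h : docName m = docName n) : m = n := by
  have h1 : (docName m).toList = (docName n).toList := by rw [h]
  simp only [docName, String.toList_append, PySem.Int.toList_toStr] at h1
  have h2 : PySem.Int.toChars (m : Int) = PySem.Int.toChars (n : Int) :=
    List.append_cancel_left h1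
  simp only [PySem.Int.toChars] at h2
  rw [if_neg (by omega), if_neg (by omega)] at h2
  simp only [Int.toNat_natCast] at h2
  exact pv_toDigits_inj hm hn h2

lemma pv_docName_not_mem {m k : Nat} (h : m < k) : docName k ∉ pvNames m := by
  intro hmem
  simp only [pvNames, List.mem_map, List.mem_range] at hmem
  obtain ⟨j, hj, hje⟩ := hmem
  have := pv_docName_inj (by omega) (by omega) hje
  omega

lemma pv_nodup_pvNames (m : Nat) : (pvNames m).Nodup := by
  refine List.Nodup.map_on ?_ (List.nodup_range)
  intro x hx y hy hxy
  simp only [List.mem_range] at hx hy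
  have := pv_docName_inj (Nat.succ_pos x) (Nat.succ_pos y) hxy
  omega

lemma pv_pvNames_succ (m : Nat) : pvNames (m + 1) = pvNames m ++ [docName (m + 1)] := by
  simp [pvNames, List.range_succ]

-- dict items after modifying the last (fresh-keyed) entry
lemma pv_items_modify_last (d : PySem.Dict String (List Int)) (done : List (String × List Int))
    (key : String) (cur : List Int) (x : Int)
    (hitems : d.items = done ++ [(key, cur)]) (hnd : d.keys.Nodup)
    (hfresh : ∀ p ∈ done, p.1 ≠ key) :
    (d.modify key [] (fun l => l ++ [x])).items = done ++ [(key, cur ++ [x])] := by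
  have hmem : (key, cur) ∈ d.items := by rw [hitems]; simp
  have hgd : d.getD key [] = cur := PySem.Dict.getD_of_mem_items d hmem hnd []
  have hkey : key ∈ d.keys := by
    simp only [PySem.Dict.keys]
    exact List.mem_map.mpr ⟨(key, cur), hmem, rfl⟩
  have hcont : d.contains key = true := by
    rw [PySem.Dict.contains_eq_decide_mem_keys]; simpa
  show (d.insert key (d.getD key [] ++ [x])).items = _
  rw [hgd, PySem.Dict.items_insert_of_contains d _ hcont, hitems, List.map_append]
  congr 1
  · exact (List.map_congr_left (fun p hp => by simp [hfresh p hp])).trans (List.map_id _)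
  · simp

-- A's loop computes specA
lemma pv_loopA (fl : List (List (String × String))) : ∀ (i : Int) (d : PySem.Dict String (List Int))
    (done : List (String × List Int)) (cur : List Int) (mp : Nat) (w0 : String),
    d.items = done ++ [(docName (mp + 1), cur)] →
    done.map (fun p => p.1) = pvNames mp →
    (analyzeLoop fl i d (docName (mp + 1)) (some w0)).items
      = specA (fl.map (fun f => (PySem.Dict.ofList f).getD "watermark" "")) i done cur (mp + 1) w0 := by
  induction fl with
  | nil => intro i d done cur mp w0 hitems hdone; simpa [analyzeLoop, specA] using hitems
  | cons f fl ih =>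
      intro i d done cur mp w0 hitems hdone
      have hkeys : d.keys = pvNames (mp + 1) := by
        simp only [PySem.Dict.keys, hitems, List.map_append, hdone, List.map_cons, List.map_nil]
        exact (pv_pvNames_succ mp).symm
      have hnodup : d.keys.Nodup := hkeys ▸ pv_nodup_pvNames _
      have hfresh : ∀ p ∈ done, p.1 ≠ docName (mp + 1) := by
        intro p hp heq
        have hm : p.1 ∈ pvNames mp := hdone ▸ List.mem_map_of_mem hp
        rw [heq] at hm
        exact pv_docName_not_mem (Nat.lt_succ_self mp) hm
      simp only [analyzeLoop, List.map_cons]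
      set w := (PySem.Dict.ofList f).getD "watermark" "" with hwdef
      by_cases hww : w = w0
      · subst hww
        simp only [ne_eq, not_true_eq_false, if_false, specA, if_true]
        exact ih (i + 1) _ done (cur ++ [i + 1]) mp w
          (pv_items_modify_last d done (docName (mp + 1)) cur (i + 1) hitems hnodup hfresh)
          hdone
      · have hlen : done.length = mp := by
          have := congrArg List.length hdone
          simpa [pvNames] using this
        have hsize : ((d.size : Int) + 1) = (((mp + 2 : Nat)) : Int) := by
          simp only [PySem.Dict.size, hitems, List.length_append, List.length_cons,
            List.length_nil, hlen]
          push_cast; ring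
        have hnd2 : ("Document " ++ PySem.Int.toStr ((d.size : Int) + 1)) = docName (mp + 2) := by
          rw [hsize]; rfl
        have hcont : d.contains (docName (mp + 2)) = false := by
          rw [PySem.Dict.contains_eq_decide_mem_keys, hkeys]
          simpa using pv_docName_not_mem (show mp + 1 < mp + 2 by omega)
        have hitems2 : (d.insert (docName (mp + 2)) ([] : List Int)).items
            = (done ++ [(docName (mp + 1), cur)]) ++ [(docName (mp + 2), ([] : List Int))] := by
          rw [PySem.Dict.items_insert_of_not_contains d _ hcont, hitems]
        have hdone2 : (done ++ [(docName (mp + 1), cur)]).map (fun p => p.1) = pvNames (mp + 1) := by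
          simp only [List.map_append, hdone, List.map_cons, List.map_nil]
          exact (pv_pvNames_succ mp).symm
        have hnodup2 : (d.insert (docName (mp + 2)) ([] : List Int)).keys.Nodup := by
          have : (d.insert (docName (mp + 2)) ([] : List Int)).keys = pvNames (mp + 2) := by
            simp only [PySem.Dict.keys, hitems2, List.map_append, hdone2, List.map_cons,
              List.map_nil]
            simpa [List.append_assoc] using (pv_pvNames_succ (mp + 1)).symm
          rw [this]; exact pv_nodup_pvNames _
        have hfresh2 : ∀ p ∈ done ++ [(docName (mp + 1), cur)], p.1 ≠ docName (mp + 2) := by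
          intro p hp heq
          have hm : p.1 ∈ pvNames (mp + 1) := hdone2 ▸ List.mem_map_of_mem hp
          rw [heq] at hm
          exact pv_docName_not_mem (show mp + 1 < mp + 2 by omega) hm
        have hmod := pv_items_modify_last (d.insert (docName (mp + 2)) ([] : List Int))
          (done ++ [(docName (mp + 1), cur)]) (docName (mp + 2)) [] (i + 1) hitems2 hnodup2 hfresh2
        simp only [ne_eq, hww, not_false_eq_true, if_true, hnd2, specA]
        exact ih (i + 1) _ (done ++ [(docName (mp + 1), cur)]) ([] ++ [i + 1]) (mp + 1) w
          hmod hdone2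

-- specA is specRuns of the runs
lemma pv_bridge : ∀ (ws : List String) (page : Int) (done : List (String × List Int))
    (cur : List Int) (m : Nat) (w0 : String),
    specA ws page done cur m w0
      = done ++ (docName m, cur ++ pagesOf (ws.takeWhile (fun x => x == w0)) page)
          :: specRuns (chunkRuns (ws.dropWhile (fun x => x == w0))) (m + 1)
              (page + ((ws.takeWhile (fun x => x == w0)).length : Int)) := by
  intro ws
  induction ws with
  | nil => intro page done cur m w0; simp [specA, pagesOf, chunkRuns, specRuns]
  | cons w ws ih =>
      intro page done cur m w0
      by_cases hw : w = w0
      · subst hw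
        simp only [specA, ih, List.takeWhile_cons, List.dropWhile_cons,
          beq_self_eq_true, if_true, pagesOf, List.length_cons]
        push_cast
        ring_nf
        simp [List.append_assoc]
      · have hbeq : (w == w0) = false := by simpa using hw
        simp only [specA, if_neg hw, ih, List.takeWhile_cons, List.dropWhile_cons, hbeq,
          Bool.false_eq_true, if_false, List.length_nil, Nat.cast_zero, add_zero,
          chunkRuns, specRuns, pagesOf, List.length_cons, List.append_nil]
        push_cast
        ring_nf
        simp [List.append_assoc]

-- A equals the canonical run decomposition
lemma pv_A_canon (features_list : List (List (String × String))) (num_pages : Int) :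
    analyze_watermarks features_list num_pages
      = canon (features_list.map (fun f => (PySem.Dict.ofList f).getD "watermark" "")) := by
  cases features_list with
  | nil => simp [analyze_watermarks, analyzeLoop, canon]; decide
  | cons f rest =>
      simp only [analyze_watermarks, analyzeLoop, List.map_cons]
      set w := (PySem.Dict.ofList f).getD "watermark" "" with hwdef
      set ws := rest.map (fun f => (PySem.Dict.ofList f).getD "watermark" "") with hwsdef
      set d0 := ((PySem.Dict.empty : PySem.Dict String (List Int)).insert "Document 1"
        ([] : List Int)) with hd0def
      have h0 : d0.items = [] ++ [("Document 1", ([] : List Int))] := by decide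
      have h0nd : d0.keys.Nodup := by decide
      have hmod := pv_items_modify_last d0 [] "Document 1" [] ((0 : Int) + 1) h0 h0nd (by simp)
      rw [show ("Document 1" : String) = docName (0 + 1) from by decide] at hmod ⊢
      rw [pv_loopA rest ((0 : Int) + 1) _ [] [(0 : Int) + 1] 0 w hmod (by simp [pvNames])]
      rw [pv_bridge]
      simp only [canon, chunkRuns, specRuns, pagesOf, List.nil_append, List.length_cons,
        List.singleton_append]
      norm_num
      rw [← hwsdef]
      exact ⟨rfl, by ring_nf⟩

-- the break comprehension on one run
lemma pv_brkAux_run : ∀ (t : List String) (w : String) (j : Int),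
    brkAux ((w :: t).zip t) j =
      (match t.dropWhile (fun x => x == w) with
       | [] => []
       | y :: dp' => (j + ((t.takeWhile (fun x => x == w)).length : Int)) ::
           brkAux ((y :: dp').zip dp') (j + ((t.takeWhile (fun x => x == w)).length : Int) + 1)) := by
  intro t
  induction t with
  | nil => intro w j; simp [brkAux]
  | cons x t' ih =>
      intro w j
      by_cases hx : x = w
      · subst hx
        have : (x == x) = true := by simp
        simp only [List.zip_cons_cons, brkAux, ne_eq, not_true_eq_false, if_false,
          List.dropWhile_cons, List.takeWhile_cons, this, if_true]
        rw [ih x (j + 1)]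
        cases hdp : t'.dropWhile (fun y => y == x) with
        | nil => rfl
        | cons y dp' =>
            simp only [List.length_cons]
            push_cast
            ring_nf
      · have hbeq : (x == w) = false := by simpa using hx
        have hne : w ≠ x := fun h => hx h.symm
        simp only [List.zip_cons_cons, brkAux, ne_eq, hne, not_false_eq_true, if_true,
          List.dropWhile_cons, List.takeWhile_cons, hbeq, Bool.false_eq_true, if_false,
          List.length_nil, Nat.cast_zero, add_zero]

-- list(range(lo+1, lo+len(g)+1)) is the page list of a run starting after page lo
lemma pv_pyRange_pages : ∀ (g : List String) (o b : Int), b = o + (g.length : Int) + 1 →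
    PySem.List.pyRange (o + 1) b 1 = pagesOf g o := by
  intro g
  induction g with
  | nil => intro o b hb; subst hb; simp [pagesOf]
  | cons x g ih =>
      intro o b hb
      have hlt : o + 1 < b := by
        subst hb; simp only [List.length_cons]; push_cast; omega
      rw [PySem.List.pyRange_one_cons hlt]
      simp only [pagesOf]
      rw [ih (o + 1) b (by subst hb; simp only [List.length_cons]; push_cast; ring)]

-- boundary pairs give exactly the run decomposition
lemma pv_pairs_runs : ∀ (ws : List String), ws ≠ [] → ∀ (k : Nat) (o : Int),
    specPairs ((o :: (brkAux (ws.zip ws.tail) (o + 1) ++ [o + (ws.length : Int)])).zip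
        (brkAux (ws.zip ws.tail) (o + 1) ++ [o + (ws.length : Int)])) k
      = specRuns (chunkRuns ws) k o := by
  intro ws
  induction ws using chunkRuns.induct with
  | case1 => intro h; exact absurd rfl h
  | case2 w t ih =>
      intro _ k o
      simp only [List.tail_cons]
      rw [pv_brkAux_run t w (o + 1)]
      cases hdp : t.dropWhile (fun x => x == w) with
      | nil =>
          have htk : t.takeWhile (fun x => x == w) = t := by
            have := List.takeWhile_append_dropWhile (p := fun x => x == w) (l := t)
            rw [hdp, List.append_nil] at this
            exact this
          simp only [List.nil_append, List.zip_cons_cons, List.zip_nil_right, specPairs,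
            chunkRuns, hdp, htk, specRuns, List.length_cons]
          rw [pv_pyRange_pages (w :: t) o _
            (by simp only [List.length_cons])]
      | cons y dp' =>
          have hlen : t.length = (t.takeWhile (fun x => x == w)).length + (y :: dp').length := by
            conv_lhs => rw [← List.takeWhile_append_dropWhile (p := fun x => x == w) (l := t)]
            rw [hdp, List.length_append]
          set L : Int := ((t.takeWhile (fun x => x == w)).length : Int) with hL
          have hrw : o + ((w :: t).length : Int) = (o + 1 + L) + ((y :: dp').length : Int) := by
            simp only [List.length_cons, hlen, hL]; push_cast; ring
          simp only [List.cons_append, List.zip_cons_cons, specPairs, chunkRuns, specRuns]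
          congr 1
          · exact congrArg (fun l => (docName k, l))
              (pv_pyRange_pages (w :: t.takeWhile (fun x => x == w)) o _
                (by simp only [List.length_cons, hL]; push_cast; ring))
          · have := ih (by simp [hdp]) (k + 1) (o + 1 + L)
            rw [hdp] at this
            simp only [List.tail_cons] at this
            rw [hrw, show o + 1 + L + 1 = (o + 1 + L) + 1 by ring]
            rw [show o + ((w :: t.takeWhile (fun x => x == w)).length : Int)
                = o + 1 + L by simp only [List.length_cons, hL]; push_cast; ring]
            rw [hdp]
            exact this

-- B's dict comprehension collects specPairs
lemma pv_foldB : ∀ (pairs : List (Int × Int)) (kp : Nat) (d : PySem.Dict String (List Int))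
    (done : List (String × List Int)),
    d.items = done → done.map (fun p => p.1) = pvNames kp →
    (altComp pairs ((kp : Int) + 1) d).items = done ++ specPairs pairs (kp + 1) := by
  intro pairs
  induction pairs with
  | nil => intro kp d done hitems hdone; simpa [altComp, specPairs] using hitems
  | cons p t ih =>
      intro kp d done hitems hdone
      obtain ⟨lo, hi⟩ := p
      have hname : ("Document " ++ PySem.Int.toStr ((kp : Int) + 1)) = docName (kp + 1) := by
        rw [show ((kp : Int) + 1) = (((kp + 1 : Nat)) : Int) by push_cast; ring]; rfl
      have hkeys : d.keys = pvNames kp := by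
        simp only [PySem.Dict.keys, hitems, hdone]
      have hcont : d.contains (docName (kp + 1)) = false := by
        rw [PySem.Dict.contains_eq_decide_mem_keys, hkeys]
        simpa using pv_docName_not_mem (Nat.lt_succ_self kp)
      have hitems2 : (d.insert (docName (kp + 1)) (PySem.List.pyRange (lo + 1) (hi + 1) 1)).items
          = done ++ [(docName (kp + 1), PySem.List.pyRange (lo + 1) (hi + 1) 1)] := by
        rw [PySem.Dict.items_insert_of_not_contains d _ hcont, hitems]
      have hdone2 : (done ++ [(docName (kp + 1), PySem.List.pyRange (lo + 1) (hi + 1) 1)]).map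
          (fun p => p.1) = pvNames (kp + 1) := by
        simp only [List.map_append, hdone, List.map_cons, List.map_nil]
        exact (pv_pvNames_succ kp).symm
      simp only [altComp, hname]
      rw [show ((kp : Int) + 1) + 1 = (((kp + 1 : Nat)) : Int) + 1 by push_cast; ring]
      rw [ih (kp + 1) _ _ hitems2 hdone2]
      simp [specPairs]

-- B equals the canonical run decomposition
lemma pv_pairs_runs0 (ws : List String) (hne : ws ≠ []) :
    specPairs (((0 : Int) :: (brkAux (ws.zip ws.tail) 1 ++ [(ws.length : Int)])).zip
        (brkAux (ws.zip ws.tail) 1 ++ [(ws.length : Int)])) 1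
      = specRuns (chunkRuns ws) 1 0 := by
  have h := pv_pairs_runs ws hne 1 0
  norm_num at h
  exact h

lemma pv_B_canon_core : ∀ (ws : List String),
    (altComp (([(0 : Int)] ++ brkAux (ws.zip ws.tail) 1 ++ [(ws.length : Int)]).zip
        (([(0 : Int)] ++ brkAux (ws.zip ws.tail) 1 ++ [(ws.length : Int)]).tail)) 1
      (PySem.Dict.empty : PySem.Dict String (List Int))).items = canon ws := by
  intro ws
  have hzip : ([(0 : Int)] ++ brkAux (ws.zip ws.tail) 1 ++ [(ws.length : Int)]).zip
      (([(0 : Int)] ++ brkAux (ws.zip ws.tail) 1 ++ [(ws.length : Int)]).tail)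
      = ((0 : Int) :: (brkAux (ws.zip ws.tail) 1 ++ [(ws.length : Int)])).zip
        (brkAux (ws.zip ws.tail) 1 ++ [(ws.length : Int)]) := by
    simp
  rw [hzip]
  have hfold := pv_foldB (((0 : Int) :: (brkAux (ws.zip ws.tail) 1 ++ [(ws.length : Int)])).zip
      (brkAux (ws.zip ws.tail) 1 ++ [(ws.length : Int)])) 0
      (PySem.Dict.empty : PySem.Dict String (List Int)) [] rfl (by simp [pvNames])
  norm_num at hfold
  rw [hfold]
  cases ws with
  | nil => decide
  | cons w t =>
      rw [pv_pairs_runs0 (w :: t) (by simp)]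
      rfl

lemma pv_B_canon (features_list : List (List (String × String))) (num_pages : Int) :
    analyze_watermarks_alt features_list num_pages
      = canon (features_list.map (fun f => (PySem.Dict.ofList f).getD "watermark" "")) := by
  simp only [analyze_watermarks_alt, PySem.List.slice_from_one]
  exact pv_B_canon_core _

-- ===== VERDICT (by name: the statement is the Claim_ definition above) =====
theorem analyze_watermarks_spec : Claim_equal_analyze_watermarks := by
  intro features_list num_pages _
  unfold Spec_analyze_watermarks
  rw [pv_A_canon, pv_B_canon]
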